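-- pv_equiv track=rewrite | github.com/fizbin/adventofcode | aoc2023/aoc14.py | roll_cycle
-- ===== SOURCE A (Python) =====
-- def roll_north(coldata: list[str]):
--     n_rounds = 0
--     n_empties = 0
--     sofar = []
--     for pos in range(len(coldata)):
--         if coldata[pos] == "O":
--             n_rounds += 1
--         elif coldata[pos] == ".":
--             n_empties += 1
--         elif coldata[pos] == "#":
--             sofar += ["O"] * n_rounds + ["."] * n_empties + ["#"]
--             n_rounds, n_empties = 0, 0
--     sofar += ["O"] * n_rounds + ["."] * n_empties
--     return sofar
--
-- def roll_cycle(coldata):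
--     working0 = coldata
--     working1 = []
--
--     # this operation is "north, then transpose" or equiv. "transpose, west"
--     for colpos in range(len(working0[0])):
--         coldata = [row[colpos] for row in working0]
--         working1.append(roll_north(coldata))
--     working0 = working1
--     working1 = []
--
--     # repeat the same operation
--     for colpos in range(len(working0[0])):
--         coldata = [row[colpos] for row in working0]
--         working1.append(roll_north(coldata))
--     working0 = working1
--     working1 = []
--     # the two "transpose"s cancel, so we've effectively done "north, then west"
--
--     # this operation is "transpose, then east"; equiv. "south, then transpose"
--     for colpos in range(len(working0[0])):
--         coldata = [row[colpos] for row in working0]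
--         working1.append(list(reversed(roll_north(list(reversed(coldata))))))
--     working0 = working1
--     working1 = []
--
--     # and repeat
--     for colpos in range(len(working0[0])):
--         coldata = [row[colpos] for row in working0]
--         working1.append(list(reversed(roll_north(list(reversed(coldata))))))
--
--     # so now the equiv. to what we've done is "north, west, south, east"
--     return working1
-- ===== SOURCE B (Python) =====
-- def roll_cycle(coldata):
--     def roll_left(line):
--         line = ''.join(c for c in line if c in 'O.#')
--         return '#'.join(''.join(sorted(seg, reverse=True)) for seg in line.split('#'))
--
--     def roll_right(line):
--         return roll_left(line[::-1])[::-1]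
--
--     def transpose(rows):
--         return [''.join(col) for col in zip(*rows)]
--
--     rows = [''.join(row) for row in coldata]
--     rows = transpose([roll_left(c) for c in transpose(rows)])   # tilt north
--     rows = [roll_left(r) for r in rows]                         # tilt west
--     rows = transpose([roll_right(c) for c in transpose(rows)])  # tilt south
--     rows = [roll_right(r) for r in rows]                        # tilt east
--     return [list(r) for r in rows]
-- ===== Notes on version B (the rewrite author's own statement) =====
-- stated objective: simpler
-- what changed: A makes four column-extraction passes each running a counting accumulator (count O's and .'s up to each '#'); B is decomposed into transpose helpers and a per-line roll that keeps the grid characters, splits the line on '#' and sorts each segment with O's first.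
import Mathlib
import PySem

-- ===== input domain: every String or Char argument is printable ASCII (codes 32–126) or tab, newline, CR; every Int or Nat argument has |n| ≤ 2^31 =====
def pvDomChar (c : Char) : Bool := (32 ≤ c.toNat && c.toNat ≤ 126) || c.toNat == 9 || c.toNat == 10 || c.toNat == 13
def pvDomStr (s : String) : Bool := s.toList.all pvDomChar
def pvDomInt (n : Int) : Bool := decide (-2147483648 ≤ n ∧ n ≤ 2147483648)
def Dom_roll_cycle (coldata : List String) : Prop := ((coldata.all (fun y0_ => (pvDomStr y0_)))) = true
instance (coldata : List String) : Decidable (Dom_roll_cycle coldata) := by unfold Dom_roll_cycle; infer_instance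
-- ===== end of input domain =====

-- B replaces A's four column-by-column counting passes by transpose helpers plus a per-line roll
-- (keep the grid characters, split on '#', sort each segment) — objective: simpler decomposition.

-- ===== PORT A =====
def roll_north (coldata : List String) : List String :=
  let st := coldata.foldl (fun (st : Nat × Nat × List String) c =>
      if c = "O" then (st.1 + 1, st.2.1, st.2.2)
      else if c = "." then (st.1, st.2.1 + 1, st.2.2)
      else if c = "#" then (0, 0, st.2.2 ++ (List.replicate st.1 "O" ++ List.replicate st.2.1 "." ++ ["#"]))
      else st) (0, 0, [])
  st.2.2 ++ (List.replicate st.1 "O" ++ List.replicate st.2.1 ".")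

def roll_cycle (coldata : List String) : List (List String) :=
  let w1 := (List.range (coldata.headD "").toList.length).map (fun (colpos : Nat) =>
      roll_north (coldata.map (fun row => ((PySem.Str.pyGet? row (colpos : Int)).map Char.toString).getD "")))
  let w2 := (List.range (w1.headD []).length).map (fun (colpos : Nat) =>
      roll_north (w1.map (fun row => (PySem.List.pyGet? row (colpos : Int)).getD "")))
  let w3 := (List.range (w2.headD []).length).map (fun (colpos : Nat) =>
      (roll_north ((w2.map (fun row => (PySem.List.pyGet? row (colpos : Int)).getD "")).reverse)).reverse)
  (List.range (w3.headD []).length).map (fun (colpos : Nat) =>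
      (roll_north ((w3.map (fun row => (PySem.List.pyGet? row (colpos : Int)).getD "")).reverse)).reverse)

-- ===== PORT B =====
def pvIsRock (c : Char) : Bool := c == 'O' || c == '.' || c == '#'

def pv_roll_left (line : List Char) : List Char :=
  PySem.Chars.join ['#'] ((PySem.Chars.splitOn (line.filter pvIsRock) ['#']).map
    (fun seg => PySem.List.sorted seg (fun c => c) true))

def pv_roll_right (line : List Char) : List Char := (pv_roll_left line.reverse).reverse

def pv_transpose (rows : List (List Char)) : List (List Char) :=
  (List.range (((rows.map List.length).min?).getD 0)).map (fun i => rows.map (fun r => r.getD i ' '))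

def roll_cycle_alt (coldata : List String) : List (List String) :=
  let rows0 := coldata.map String.toList
  let rows1 := pv_transpose ((pv_transpose rows0).map pv_roll_left)
  let rows2 := rows1.map pv_roll_left
  let rows3 := pv_transpose ((pv_transpose rows2).map pv_roll_right)
  let rows4 := rows3.map pv_roll_right
  rows4.map (fun r => r.map Char.toString)

-- ===== PRECONDITION & SPEC =====
-- number of grid characters ('O','.','#') in column i of the input
def pv_k (coldata : List String) (i : Nat) : Nat :=
  ((coldata.map (fun r => r.toList.getD i ' ')).filter (fun c => c == 'O' || c == '.' || c == '#')).length

-- Pre_ is exactly the inputs on which A returns normally: a nonempty grid with nonzero first-row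
-- width w, no row shorter than the first (else A's row[colpos] raises IndexError), every column of
-- the read region keeping at least as many grid characters as column 0 keeps, and column 0 keeping
-- at least one (else a later pass of A indexes an empty or too-short list and raises IndexError).
def Pre_roll_cycle (coldata : List String) : Prop :=
  (!coldata.isEmpty && 0 < (coldata.headD "").toList.length &&
    coldata.all (fun r => (coldata.headD "").toList.length ≤ r.toList.length) &&
    (List.range (coldata.headD "").toList.length).all
      (fun i => pv_k coldata 0 ≤ pv_k coldata i) &&
    0 < pv_k coldata 0) = true
instance (coldata : List String) : Decidable (Pre_roll_cycle coldata) := by unfold Pre_roll_cycle; infer_instance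

def pvWitness_roll_cycle : List String := ["O#.", ".O#"]

def Spec_roll_cycle (coldata : List String) (out : List (List String)) : Prop := out = roll_cycle_alt coldata
instance (coldata : List String) (out : List (List String)) : Decidable (Spec_roll_cycle coldata out) := by unfold Spec_roll_cycle; infer_instance

-- ===== CLAIM (what is proved, stated in full; the proofs are below) =====
def Claim_equal_roll_cycle : Prop := ∀ (coldata : List String), Dom_roll_cycle coldata → Pre_roll_cycle coldata → Spec_roll_cycle coldata (roll_cycle coldata)

-- ===== LEMMAS AND PROOFS =====

-- rock characters, propositionally
def pvRock (c : Char) : Prop := c = 'O' ∨ c = '.' ∨ c = '#'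

theorem pv_rock_isRock {c : Char} (h : pvRock c) : pvIsRock c = true := by
  rcases h with h | h | h <;> subst h <;> decide

theorem pv_filter_rock (l : List Char) : ∀ c ∈ l.filter pvIsRock, pvRock c := by
  intro c hc
  have h := (List.mem_filter.mp hc).2
  simp only [pvIsRock, Bool.or_eq_true, beq_iff_eq] at h
  unfold pvRock; tauto

theorem pv_filter_eq_self (l : List Char) (h : ∀ c ∈ l, pvRock c) : l.filter pvIsRock = l :=
  List.filter_eq_self.mpr (fun c hc => pv_rock_isRock (h c hc))

-- char-level version of A's roll_north
def pvRollN (col : List Char) : List Char :=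
  let st := col.foldl (fun (st : Nat × Nat × List Char) c =>
      if c = 'O' then (st.1 + 1, st.2.1, st.2.2)
      else if c = '.' then (st.1, st.2.1 + 1, st.2.2)
      else if c = '#' then (0, 0, st.2.2 ++ (List.replicate st.1 'O' ++ List.replicate st.2.1 '.' ++ ['#']))
      else st) (0, 0, [])
  st.2.2 ++ (List.replicate st.1 'O' ++ List.replicate st.2.1 '.')

-- structural normal form of one rolled line
def pvRollSeg (nr ne : Nat) : List Char → List Char
  | [] => List.replicate nr 'O' ++ List.replicate ne '.'
  | c :: t =>
      if c = 'O' then pvRollSeg (nr + 1) ne t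
      else if c = '.' then pvRollSeg nr (ne + 1) t
      else List.replicate nr 'O' ++ List.replicate ne '.' ++ '#' :: pvRollSeg 0 0 t

-- spec of str.split('#')
def pvSp : List Char → List (List Char)
  | [] => [[]]
  | c :: t => if c = '#' then [] :: pvSp t else (c :: (pvSp t).headD []) :: (pvSp t).tail

-- canonical transpose of a grid with n columns
def pvTn (n : Nat) (g : List (List Char)) : List (List Char) :=
  (List.range n).map (fun i => g.map (fun r => r.getD i ' '))

-- rectangular all-rock grid
def pvGrid (m n : Nat) (g : List (List Char)) : Prop :=
  g.length = m ∧ ∀ r ∈ g, r.length = n ∧ ∀ c ∈ r, pvRock c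

theorem pv_sp_ne_nil (l : List Char) : pvSp l ≠ [] := by
  cases l with
  | nil => simp [pvSp]
  | cons c t => simp only [pvSp]; split <;> simp

theorem pv_go_eq (l : List Char) : ∀ (fuel : Nat) (cur : List Char) (acc : List (List Char)),
    l.length < fuel →
    PySem.Chars.splitOn.go ['#'] fuel l cur acc
      = acc.reverse ++ ((cur.reverse ++ (pvSp l).headD []) :: (pvSp l).tail) := by
  induction l with
  | nil =>
    intro fuel cur acc h
    cases fuel with
    | zero => omega
    | succ f => simp [PySem.Chars.splitOn.go, pvSp]
  | cons c t ih =>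
    intro fuel cur acc h
    cases fuel with
    | zero => simp at h
    | succ f =>
      rw [PySem.Chars.splitOn.go]
      by_cases hc : c = '#'
      · subst hc
        rw [if_pos (by simp [List.isPrefixOf])]
        have hdrop : List.drop (['#'] : List Char).length ('#' :: t) = t := rfl
        rw [hdrop, ih f [] (cur.reverse :: acc) (by simp at h; omega)]
        cases h1 : pvSp t with
        | nil => exact absurd h1 (pv_sp_ne_nil t)
        | cons s ss => simp [pvSp, h1]
      · rw [if_neg (by simp [List.isPrefixOf]; exact fun h => hc h.symm)]
        rw [ih f (c :: cur) acc (by simp at h; omega)]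
        cases h1 : pvSp t with
        | nil => exact absurd h1 (pv_sp_ne_nil t)
        | cons s ss => simp [pvSp, hc, h1]

theorem pv_splitOn_eq_sp (l : List Char) : PySem.Chars.splitOn l ['#'] = pvSp l := by
  rw [PySem.Chars.splitOn, pv_go_eq l (l.length + 1) [] [] (by omega)]
  cases h1 : pvSp l with
  | nil => exact absurd h1 (pv_sp_ne_nil l)
  | cons s ss => simp

theorem pv_toString_eq_iff (c d : Char) : c.toString = d.toString ↔ c = d := by
  constructor
  · intro h
    have := congrArg String.toList h
    simpa [Char.toString] using this
  · intro h; rw [h]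

theorem pv_rollN_lift_fold (col : List Char) : ∀ (nr ne : Nat) (sc : List Char),
    (col.map Char.toString).foldl (fun (st : Nat × Nat × List String) c =>
      if c = "O" then (st.1 + 1, st.2.1, st.2.2)
      else if c = "." then (st.1, st.2.1 + 1, st.2.2)
      else if c = "#" then (0, 0, st.2.2 ++ (List.replicate st.1 "O" ++ List.replicate st.2.1 "." ++ ["#"]))
      else st) (nr, ne, sc.map Char.toString)
    = (fun (t : Nat × Nat × List Char) => (t.1, t.2.1, t.2.2.map Char.toString))
      (col.foldl (fun (st : Nat × Nat × List Char) c =>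
        if c = 'O' then (st.1 + 1, st.2.1, st.2.2)
        else if c = '.' then (st.1, st.2.1 + 1, st.2.2)
        else if c = '#' then (0, 0, st.2.2 ++ (List.replicate st.1 'O' ++ List.replicate st.2.1 '.' ++ ['#']))
        else st) (nr, ne, sc)) := by
  induction col with
  | nil => intro nr ne sc; rfl
  | cons c t ih =>
    intro nr ne sc
    simp only [List.map_cons, List.foldl_cons]
    have hO : (Char.toString c = "O") = (c = 'O') := by
      rw [show ("O" : String) = Char.toString 'O' from rfl]; exact propext (pv_toString_eq_iff c 'O')
    have hD : (Char.toString c = ".") = (c = '.') := by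
      rw [show ("." : String) = Char.toString '.' from rfl]; exact propext (pv_toString_eq_iff c '.')
    have hH : (Char.toString c = "#") = (c = '#') := by
      rw [show ("#" : String) = Char.toString '#' from rfl]; exact propext (pv_toString_eq_iff c '#')
    by_cases h1 : c = 'O'
    · simp only [h1, ↓reduceIte]; exact ih (nr+1) ne sc
    · by_cases h2 : c = '.'
      · simp only [h2, ↓reduceIte]; exact ih nr (ne+1) sc
      · by_cases h3 : c = '#'
        · simp only [h3, ↓reduceIte]
          have : (sc ++ (List.replicate nr 'O' ++ List.replicate ne '.' ++ ['#'])).map Char.toString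
              = sc.map Char.toString ++ (List.replicate nr "O" ++ List.replicate ne "." ++ ["#"]) := by
            simp [List.map_replicate]; rfl
          rw [← this]; exact ih 0 0 _
        · simp only [hO, hD, hH, h1, h2, h3, ↓reduceIte]; exact ih nr ne sc

theorem pv_roll_north_lift (col : List Char) :
    roll_north (col.map Char.toString) = (pvRollN col).map Char.toString := by
  show _ = (pvRollN col).map Char.toString
  unfold roll_north pvRollN
  rw [show ((0, 0, ([] : List String)) : Nat × Nat × List String)
        = (0, 0, ([] : List Char).map Char.toString) from rfl]
  rw [pv_rollN_lift_fold col 0 0 []]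
  simp only [List.map_append, List.map_replicate]
  rfl

-- A's counting fold keeps exactly the grid characters of the column
theorem pv_fold_inv (col : List Char) : ∀ (nr ne : Nat) (sofar : List Char),
    (fun (st : Nat × Nat × List Char) => st.2.2 ++ (List.replicate st.1 'O' ++ List.replicate st.2.1 '.'))
      (col.foldl (fun (st : Nat × Nat × List Char) c =>
        if c = 'O' then (st.1 + 1, st.2.1, st.2.2)
        else if c = '.' then (st.1, st.2.1 + 1, st.2.2)
        else if c = '#' then (0, 0, st.2.2 ++ (List.replicate st.1 'O' ++ List.replicate st.2.1 '.' ++ ['#']))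
        else st) (nr, ne, sofar))
    = sofar ++ pvRollSeg nr ne (col.filter pvIsRock) := by
  induction col with
  | nil => intro nr ne sofar; simp [pvRollSeg]
  | cons c t ih =>
    intro nr ne sofar
    by_cases h1 : c = 'O'
    · subst h1
      rw [List.filter_cons_of_pos (by decide)]
      simp only [List.foldl_cons, ↓reduceIte]
      rw [show pvRollSeg nr ne ('O' :: t.filter pvIsRock) = pvRollSeg (nr + 1) ne (t.filter pvIsRock) from rfl]
      exact ih (nr + 1) ne sofar
    · by_cases h2 : c = '.'
      · subst h2
        rw [List.filter_cons_of_pos (by decide)]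
        simp only [List.foldl_cons, ↓reduceIte]
        rw [show pvRollSeg nr ne ('.' :: t.filter pvIsRock) = pvRollSeg nr (ne + 1) (t.filter pvIsRock) from rfl]
        exact ih nr (ne + 1) sofar
      · by_cases h3 : c = '#'
        · subst h3
          rw [List.filter_cons_of_pos (by decide)]
          simp only [List.foldl_cons, ↓reduceIte]
          rw [show pvRollSeg nr ne ('#' :: t.filter pvIsRock)
                = List.replicate nr 'O' ++ List.replicate ne '.' ++ '#' :: pvRollSeg 0 0 (t.filter pvIsRock) from rfl]
          exact (ih 0 0 (sofar ++ (List.replicate nr 'O' ++ List.replicate ne '.' ++ ['#']))).trans (by simp)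
        · have hf : pvIsRock c = false := by simp [pvIsRock, h1, h2, h3]
          rw [List.filter_cons_of_neg (by simp [hf])]
          simp only [List.foldl_cons]
          rw [if_neg h1, if_neg h2, if_neg h3]
          exact ih nr ne sofar

theorem pvRollN_filter (col : List Char) : pvRollN col = pvRollSeg 0 0 (col.filter pvIsRock) := by
  have := pv_fold_inv col 0 0 []
  simpa [pvRollN] using this

theorem pv_roll_north_filter (col : List Char) :
    roll_north (col.map Char.toString) = (pvRollSeg 0 0 (col.filter pvIsRock)).map Char.toString :=
  (pv_roll_north_lift col).trans (congrArg _ (pvRollN_filter col))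

theorem pv_roll_north_R (col : List Char) (h : ∀ c ∈ col, pvRock c) :
    roll_north (col.map Char.toString) = (pvRollSeg 0 0 col).map Char.toString := by
  rw [pv_roll_north_filter, pv_filter_eq_self col h]

theorem pv_sp_mem (l : List Char) : ∀ s ∈ pvSp l, ∀ c ∈ s, c ∈ l ∧ c ≠ '#' := by
  induction l with
  | nil => intro s hs c hc; simp [pvSp] at hs; subst hs; simp at hc
  | cons a t ih =>
    intro s hs c hc
    by_cases ha : a = '#'
    · subst ha
      rw [show pvSp ('#' :: t) = [] :: pvSp t from by rw [pvSp]; simp] at hs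
      rcases List.mem_cons.mp hs with h | h
      · subst h; simp at hc
      · rcases ih s h c hc with ⟨h1, h2⟩; exact ⟨List.mem_cons_of_mem _ h1, h2⟩
    · rw [show pvSp (a :: t) = (a :: (pvSp t).headD []) :: (pvSp t).tail from by
          rw [pvSp]; simp [ha]] at hs
      rcases List.mem_cons.mp hs with h | h
      · subst h
        rcases List.mem_cons.mp hc with h2 | h2
        · subst h2; exact ⟨List.mem_cons_self, ha⟩
        · have hne := pv_sp_ne_nil t
          have hhd : (pvSp t).headD [] ∈ pvSp t := by
            cases h3 : pvSp t with
            | nil => exact absurd h3 hne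
            | cons x xs => simp
          rcases ih _ hhd c h2 with ⟨h4, h5⟩
          exact ⟨List.mem_cons_of_mem _ h4, h5⟩
      · have : s ∈ pvSp t := List.mem_of_mem_tail h
        rcases ih s this c hc with ⟨h4, h5⟩
        exact ⟨List.mem_cons_of_mem _ h4, h5⟩

theorem pv_desc_canon (l : List Char) (h2 : ∀ c ∈ l, c = 'O' ∨ c = '.')
    (hp : l.Pairwise (fun a b => b ≤ a)) :
    l = List.replicate (l.count 'O') 'O' ++ List.replicate (l.count '.') '.' := by
  induction l with
  | nil => simp
  | cons a t ih =>
    have hpt := (List.pairwise_cons.mp hp).2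
    have hle := (List.pairwise_cons.mp hp).1
    have ht2 : ∀ c ∈ t, c = 'O' ∨ c = '.' := fun c hc => h2 c (List.mem_cons_of_mem _ hc)
    rcases h2 a List.mem_cons_self with h | h
    · subst h
      rw [List.count_cons_self, List.count_cons_of_ne (by decide)]
      rw [List.replicate_succ, List.cons_append]
      exact congrArg _ (ih ht2 hpt)
    · subst h
      have hnoO : 'O' ∉ t := by
        intro hmem
        have := hle 'O' hmem
        exact absurd this (by decide)
      have htd : ∀ c ∈ t, c = '.' := by
        intro c hc
        rcases ht2 c hc with h | h
        · subst h; exact absurd hc hnoO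
        · exact h
      rw [List.count_cons_of_ne (by decide), List.count_cons_self]
      rw [List.count_eq_zero.mpr hnoO]
      have hcd : t.count '.' = t.length := List.count_eq_length.mpr (fun c hc => by rw [htd c hc])
      rw [hcd]
      simp only [List.replicate_zero, List.nil_append, List.replicate_succ]
      exact congrArg _ (List.eq_replicate_of_mem htd)

theorem pv_sorted_desc (s : List Char) (h2 : ∀ c ∈ s, c = 'O' ∨ c = '.') :
    PySem.List.sorted s (fun c => c) true
      = List.replicate (s.count 'O') 'O' ++ List.replicate (s.count '.') '.' := by
  have hperm : (PySem.List.sorted s (fun c => c) true).Perm s := PySem.List.sorted_perm s _ _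
  have hmem : ∀ c ∈ PySem.List.sorted s (fun c => c) true, c = 'O' ∨ c = '.' := by
    intro c hc
    exact h2 c (hperm.mem_iff.mp hc)
  have hp : (PySem.List.sorted s (fun c => c) true).Pairwise (fun a b => b ≤ a) :=
    PySem.List.sorted_pairwise_rev s _
  rw [pv_desc_canon _ hmem hp, hperm.count_eq, hperm.count_eq]

theorem pv_intercalate_cons (x : List Char) (ys : List (List Char)) :
    (['#'] : List Char).intercalate (x :: ys) = x ++ ys.flatMap (fun s => '#' :: s) := by
  induction ys generalizing x with
  | nil => simp [List.intercalate]
  | cons y ys ih =>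
    rw [show (['#'] : List Char).intercalate (x :: y :: ys)
          = x ++ ['#'] ++ (['#'] : List Char).intercalate (y :: ys) from by
        simp [List.intercalate, List.intersperse]]
    rw [ih y]
    simp

theorem pv_rollSeg_eq_nf (l : List Char) : (∀ c ∈ l, pvRock c) → ∀ (nr ne : Nat),
    pvRollSeg nr ne l
      = List.replicate (nr + ((pvSp l).headD []).count 'O') 'O'
        ++ List.replicate (ne + ((pvSp l).headD []).count '.') '.'
        ++ (pvSp l).tail.flatMap (fun s =>
              '#' :: (List.replicate (s.count 'O') 'O' ++ List.replicate (s.count '.') '.')) := by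
  induction l with
  | nil => intro _ nr ne; simp [pvSp, pvRollSeg]
  | cons c t ih =>
    intro hr nr ne
    have hc : pvRock c := hr c List.mem_cons_self
    have ht : ∀ c ∈ t, pvRock c := fun x hx => hr x (List.mem_cons_of_mem _ hx)
    cases h1 : pvSp t with
    | nil => exact absurd h1 (pv_sp_ne_nil t)
    | cons s0 ss =>
    rcases hc with h | h | h
    · subst h
      rw [show pvRollSeg nr ne ('O' :: t) = pvRollSeg (nr + 1) ne t from rfl]
      rw [ih ht (nr + 1) ne]
      rw [show pvSp ('O' :: t) = ('O' :: s0) :: ss from by rw [pvSp]; simp [h1], h1]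
      simp only [List.headD_cons, List.tail_cons, List.count_cons]
      rw [show nr + 1 + List.count 'O' s0 = nr + (List.count 'O' s0 + 1) from by omega]
      norm_num
      decide
    · subst h
      rw [show pvRollSeg nr ne ('.' :: t) = pvRollSeg nr (ne + 1) t from rfl]
      rw [ih ht nr (ne + 1)]
      rw [show pvSp ('.' :: t) = ('.' :: s0) :: ss from by rw [pvSp]; simp [h1], h1]
      simp only [List.headD_cons, List.tail_cons, List.count_cons]
      rw [show ne + 1 + List.count '.' s0 = ne + (List.count '.' s0 + 1) from by omega]
      norm_num
      decide
    · subst h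
      rw [show pvRollSeg nr ne ('#' :: t)
            = List.replicate nr 'O' ++ List.replicate ne '.' ++ '#' :: pvRollSeg 0 0 t from rfl]
      rw [ih ht 0 0]
      rw [show pvSp ('#' :: t) = [] :: pvSp t from by rw [pvSp]; simp, h1]
      simp

-- B's per-line roll computes the normal form of the grid characters of the line
theorem pv_roll_left_eq (l : List Char) :
    pv_roll_left l = pvRollSeg 0 0 (l.filter pvIsRock) := by
  have h : ∀ c ∈ l.filter pvIsRock, pvRock c := pv_filter_rock l
  unfold pv_roll_left
  rw [pv_splitOn_eq_sp]
  have hcongr : (pvSp (l.filter pvIsRock)).map (fun seg => PySem.List.sorted seg (fun c => c) true)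
      = (pvSp (l.filter pvIsRock)).map
          (fun s => List.replicate (s.count 'O') 'O' ++ List.replicate (s.count '.') '.') := by
    apply List.map_congr_left
    intro s hs
    apply pv_sorted_desc
    intro c hc
    rcases pv_sp_mem _ s hs c hc with ⟨h1, h2⟩
    rcases h c h1 with h3 | h3 | h3
    · exact Or.inl h3
    · exact Or.inr h3
    · exact absurd h3 h2
  rw [hcongr]
  cases h1 : pvSp (l.filter pvIsRock) with
  | nil => exact absurd h1 (pv_sp_ne_nil _)
  | cons s0 ss =>
    show (['#'] : List Char).intercalate _ = _
    rw [List.map_cons, pv_intercalate_cons, List.flatMap_map]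
    rw [pv_rollSeg_eq_nf _ h 0 0, h1]
    simp

theorem pv_rollSeg_length (l : List Char) : (∀ c ∈ l, pvRock c) → ∀ (nr ne : Nat),
    (pvRollSeg nr ne l).length = nr + ne + l.length := by
  induction l with
  | nil => intro _ nr ne; simp [pvRollSeg]
  | cons c t ih =>
    intro hr nr ne
    have ht : ∀ c ∈ t, pvRock c := fun x hx => hr x (List.mem_cons_of_mem _ hx)
    rcases hr c List.mem_cons_self with h | h | h
    · subst h
      rw [show pvRollSeg nr ne ('O' :: t) = pvRollSeg (nr + 1) ne t from rfl, ih ht]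
      simp; omega
    · subst h
      rw [show pvRollSeg nr ne ('.' :: t) = pvRollSeg nr (ne + 1) t from rfl, ih ht]
      simp; omega
    · subst h
      rw [show pvRollSeg nr ne ('#' :: t)
            = List.replicate nr 'O' ++ List.replicate ne '.' ++ '#' :: pvRollSeg 0 0 t from rfl]
      simp [ih ht]; omega

theorem pv_rollSeg_rock (l : List Char) : ∀ (nr ne : Nat), ∀ c ∈ pvRollSeg nr ne l, pvRock c := by
  induction l with
  | nil =>
    intro nr ne c hc
    simp only [pvRollSeg, List.mem_append] at hc
    rcases hc with h | h
    · exact Or.inl (List.eq_of_mem_replicate h)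
    · exact Or.inr (Or.inl (List.eq_of_mem_replicate h))
  | cons a t ih =>
    intro nr ne c hc
    by_cases h1 : a = 'O'
    · subst h1; exact ih (nr + 1) ne c hc
    · by_cases h2 : a = '.'
      · subst h2
        rw [show pvRollSeg nr ne ('.' :: t) = pvRollSeg nr (ne + 1) t from rfl] at hc
        exact ih nr (ne + 1) c hc
      · rw [show pvRollSeg nr ne (a :: t)
              = if a = 'O' then pvRollSeg (nr + 1) ne t
                else if a = '.' then pvRollSeg nr (ne + 1) t
                else List.replicate nr 'O' ++ List.replicate ne '.' ++ '#' :: pvRollSeg 0 0 t from rfl,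
            if_neg h1, if_neg h2] at hc
        simp only [List.append_assoc, List.mem_append, List.mem_cons] at hc
        rcases hc with h | h | h
        · exact Or.inl (List.eq_of_mem_replicate h)
        · exact Or.inr (Or.inl (List.eq_of_mem_replicate h))
        · rcases h with h | h
          · exact Or.inr (Or.inr h)
          · exact ih 0 0 c h

theorem pv_headD_mem {α : Type} (l : List α) (d : α) (h : l ≠ []) : l.headD d ∈ l := by
  cases l with
  | nil => exact absurd rfl h
  | cons a t => exact List.mem_cons_self

theorem pv_headD_map {α β : Type} (l : List α) (f : α → β) (d : β) (d' : α) (h : l ≠ []) :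
    (l.map f).headD d = f (l.headD d') := by
  cases l with
  | nil => exact absurd rfl h
  | cons a t => rfl

theorem pv_range_map_headD {α : Type} (n : Nat) (f : Nat → α) (d : α) (h : 0 < n) :
    ((List.range n).map f).headD d = f 0 := by
  obtain ⟨m, rfl⟩ : ∃ m, n = m + 1 := ⟨n - 1, by omega⟩
  rw [List.range_succ_eq_map]
  rfl

theorem pv_grid_Tn0 (g : List (List Char)) (m n : Nat) (hlen : g.length = m)
    (hge : ∀ r ∈ g, n ≤ r.length) (hrock : ∀ r ∈ g, ∀ c ∈ r.take n, pvRock c) :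
    pvGrid n m (pvTn n g) := by
  constructor
  · simp [pvTn]
  · intro r hr
    rcases List.mem_map.mp hr with ⟨i, hi, hr'⟩
    have hi' : i < n := List.mem_range.mp hi
    subst hr'
    constructor
    · simp [hlen]
    · intro c hc
      rcases List.mem_map.mp hc with ⟨row, hrow, hc'⟩
      subst hc'
      have hl : i < row.length := lt_of_lt_of_le hi' (hge row hrow)
      rw [List.getD_eq_getElem row ' ' hl]
      have : row[i] ∈ row.take n := by
        have ht : i < (row.take n).length := by
          rw [List.length_take]; omega
        have : (row.take n)[i] = row[i] := List.getElem_take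
        rw [← this]
        exact List.getElem_mem ht
      exact hrock row hrow _ this

theorem pv_grid_Tn (g : List (List Char)) (m n : Nat) (hg : pvGrid m n g) :
    pvGrid n m (pvTn n g) := by
  rcases hg with ⟨h1, h2⟩
  refine pv_grid_Tn0 g m n h1 (fun r hr => le_of_eq (h2 r hr).1.symm) ?_
  intro r hr c hc
  exact (h2 r hr).2 c (List.mem_of_mem_take hc)

theorem pv_grid_mapR (g : List (List Char)) (m n : Nat) (hg : pvGrid m n g) :
    pvGrid m n (g.map (fun r => pvRollSeg 0 0 r)) := by
  rcases hg with ⟨h1, h2⟩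
  constructor
  · simp [h1]
  · intro r hr
    rcases List.mem_map.mp hr with ⟨r0, hr0, hr'⟩
    subst hr'
    constructor
    · rw [pv_rollSeg_length r0 (h2 r0 hr0).2 0 0]
      simp [(h2 r0 hr0).1]
    · exact pv_rollSeg_rock r0 0 0

theorem pv_grid_mapRrev (g : List (List Char)) (m n : Nat) (hg : pvGrid m n g) :
    pvGrid m n (g.map (fun r => (pvRollSeg 0 0 r.reverse).reverse)) := by
  rcases hg with ⟨h1, h2⟩
  constructor
  · simp [h1]
  · intro r hr
    rcases List.mem_map.mp hr with ⟨r0, hr0, hr'⟩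
    subst hr'
    constructor
    · rw [List.length_reverse, pv_rollSeg_length r0.reverse
        (fun c hc => (h2 r0 hr0).2 c (List.mem_reverse.mp hc)) 0 0]
      simp [(h2 r0 hr0).1]
    · intro c hc
      exact pv_rollSeg_rock r0.reverse 0 0 c (List.mem_reverse.mp hc)

theorem pv_grid_ne_nil (g : List (List Char)) (m n : Nat) (hg : pvGrid m n g) (hm : 0 < m) :
    g ≠ [] := by
  intro h
  rw [h] at hg
  simp [pvGrid] at hg
  omega

theorem pv_grid_headD_len (g : List (List Char)) (m n : Nat) (hg : pvGrid m n g) (hm : 0 < m) :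
    (g.headD []).length = n :=
  (hg.2 _ (pv_headD_mem g [] (pv_grid_ne_nil g m n hg hm))).1

theorem pv_min_getD (g : List (List Char)) (n : Nat) (h : g ≠ [])
    (h1 : (g.headD []).length = n) (h2 : ∀ r ∈ g, n ≤ r.length) :
    ((g.map List.length).min?).getD 0 = n := by
  have hmem : n ∈ g.map List.length := by
    rw [← h1]
    exact List.mem_map.mpr ⟨g.headD [], pv_headD_mem g [] h, rfl⟩
  have : (g.map List.length).min? = some n := by
    rw [List.min?_eq_some_iff]
    refine ⟨hmem, ?_⟩
    intro b hb
    rcases List.mem_map.mp hb with ⟨r, hr, hb'⟩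
    subst hb'
    exact h2 r hr
  rw [this]; rfl

theorem pv_transpose_eq (g : List (List Char)) (n : Nat) (h : g ≠ [])
    (h1 : (g.headD []).length = n) (h2 : ∀ r ∈ g, n ≤ r.length) :
    pv_transpose g = pvTn n g := by
  unfold pv_transpose pvTn
  rw [pv_min_getD g n h h1 h2]

theorem pv_transpose_grid_eq (g : List (List Char)) (m n : Nat) (hg : pvGrid m n g)
    (hm : 0 < m) : pv_transpose g = pvTn n g :=
  pv_transpose_eq g n (pv_grid_ne_nil g m n hg hm) (pv_grid_headD_len g m n hg hm)
    (fun r hr => le_of_eq (hg.2 r hr).1.symm)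

theorem pv_roll_left_map (g : List (List Char)) :
    g.map pv_roll_left = g.map (fun r => pvRollSeg 0 0 (r.filter pvIsRock)) :=
  List.map_congr_left (fun r _ => pv_roll_left_eq r)

theorem pv_roll_left_map_rock (g : List (List Char)) (m n : Nat) (hg : pvGrid m n g) :
    g.map pv_roll_left = g.map (fun r => pvRollSeg 0 0 r) := by
  apply List.map_congr_left
  intro r hr
  rw [pv_roll_left_eq, pv_filter_eq_self r (hg.2 r hr).2]

theorem pv_roll_right_map (g : List (List Char)) (m n : Nat) (hg : pvGrid m n g) :
    g.map pv_roll_right = g.map (fun r => (pvRollSeg 0 0 r.reverse).reverse) := by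
  apply List.map_congr_left
  intro r hr
  unfold pv_roll_right
  rw [pv_roll_left_eq,
    pv_filter_eq_self r.reverse (fun c hc => (hg.2 r hr).2 c (List.mem_reverse.mp hc))]

theorem pv_colsA (g : List (List Char)) (b : Nat) (i : Nat)
    (hb : ∀ r ∈ g, b ≤ r.length) (hi : i < b) :
    (g.map (fun r => r.map Char.toString)).map (fun row => (PySem.List.pyGet? row (i : Int)).getD "")
      = (g.map (fun r => r.getD i ' ')).map Char.toString := by
  simp only [List.map_map]
  apply List.map_congr_left
  intro r hr
  simp only [Function.comp]
  have hl : i < (r.map Char.toString).length := by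
    rw [List.length_map]; exact lt_of_lt_of_le hi (hb r hr)
  rw [PySem.List.pyGet?_natCast]
  rw [List.getElem?_eq_getElem hl]
  simp only [Option.getD_some]
  rw [List.getElem_map, List.getD_eq_getElem r ' ' (lt_of_lt_of_le hi (hb r hr))]

theorem pv_TnRS (g : List (List Char)) (b : Nat) (R : List Char → List Char)
    (S : List Char → List String) :
    ((pvTn b g).map R).map S = (List.range b).map (fun i => S (R (g.map (fun r => r.getD i ' ')))) := by
  simp [pvTn, List.map_map, Function.comp]

-- one of A's plain passes, on a possibly ragged all-rock grid whose rows are at least as long as the first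
theorem pv_passA (g : List (List Char)) (b : Nat) (hne : g ≠ [])
    (hlen : (g.headD []).length = b)
    (hge : ∀ r ∈ g, b ≤ r.length) (hrock : ∀ r ∈ g, ∀ c ∈ r, pvRock c) :
    (List.range ((g.map (fun r => r.map Char.toString)).headD []).length).map (fun (i : Nat) =>
        roll_north ((g.map (fun r => r.map Char.toString)).map
          (fun row => (PySem.List.pyGet? row (i : Int)).getD "")))
      = ((pvTn b g).map (fun c => pvRollSeg 0 0 c)).map (fun r => r.map Char.toString) := by
  rw [pv_headD_map g _ [] [] hne, List.length_map, hlen]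
  rw [pv_TnRS]
  apply List.map_congr_left
  intro i hi
  have hi' : i < b := List.mem_range.mp hi
  rw [pv_colsA g b i hge hi']
  have hrock' : ∀ c ∈ g.map (fun r => r.getD i ' '), pvRock c := by
    intro c hc
    rcases List.mem_map.mp hc with ⟨r, hr, hc'⟩
    subst hc'
    rw [List.getD_eq_getElem r ' ' (lt_of_lt_of_le hi' (hge r hr))]
    exact hrock r hr _ (List.getElem_mem _)
  rw [pv_roll_north_R _ hrock']

theorem pv_passA_rev (g : List (List Char)) (a b : Nat) (hg : pvGrid a b g) (ha : 0 < a) :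
    (List.range ((g.map (fun r => r.map Char.toString)).headD []).length).map (fun (i : Nat) =>
        (roll_north (((g.map (fun r => r.map Char.toString)).map
          (fun row => (PySem.List.pyGet? row (i : Int)).getD "")).reverse)).reverse)
      = ((pvTn b g).map (fun c => (pvRollSeg 0 0 c.reverse).reverse)).map (fun r => r.map Char.toString) := by
  have hne := pv_grid_ne_nil g a b hg ha
  rw [pv_headD_map g _ [] [] hne, List.length_map, pv_grid_headD_len g a b hg ha]
  rw [pv_TnRS]
  apply List.map_congr_left
  intro i hi
  have hi' : i < b := List.mem_range.mp hi
  rw [pv_colsA g b i (fun r hr => (hg.2 r hr).1.ge) hi']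
  rw [← List.map_reverse]
  have hrock : ∀ c ∈ (g.map (fun r => r.getD i ' ')).reverse, pvRock c := by
    intro c hc
    rcases List.mem_reverse.mp hc with hc2
    rcases List.mem_map.mp hc2 with ⟨r, hr, hc'⟩
    subst hc'
    rw [List.getD_eq_getElem r ' ' (by rw [(hg.2 r hr).1]; exact hi')]
    exact (hg.2 r hr).2 _ (List.getElem_mem _)
  rw [pv_roll_north_R _ hrock]
  simp only [List.map_reverse]

theorem pv_pass1A (coldata : List String) (n : Nat)
    (hn : (coldata.headD "").toList.length = n)
    (hge : ∀ r ∈ coldata, n ≤ r.toList.length) :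
    (List.range (coldata.headD "").toList.length).map (fun (colpos : Nat) =>
        roll_north (coldata.map (fun row => ((PySem.Str.pyGet? row (colpos : Int)).map Char.toString).getD "")))
      = ((pvTn n (coldata.map String.toList)).map (fun c => pvRollSeg 0 0 (c.filter pvIsRock))).map
          (fun r => r.map Char.toString) := by
  rw [hn, pv_TnRS]
  apply List.map_congr_left
  intro i hi
  have hi' : i < n := List.mem_range.mp hi
  have hinner : coldata.map (fun row => ((PySem.Str.pyGet? row (i : Int)).map Char.toString).getD "")
      = ((coldata.map String.toList).map (fun r => r.getD i ' ')).map Char.toString := by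
    simp only [List.map_map]
    apply List.map_congr_left
    intro row hrow
    simp only [Function.comp, PySem.Str.pyGet?_natCast]
    have hl : i < row.toList.length := lt_of_lt_of_le hi' (hge row hrow)
    rw [List.getElem?_eq_getElem hl]
    simp only [Option.map_some, Option.getD_some]
    rw [List.getD_eq_getElem row.toList ' ' hl]
  rw [hinner]
  rw [pv_roll_north_filter]

theorem pv_col_eq (coldata : List String) (i : Nat) :
    (coldata.map String.toList).map (fun r => r.getD i ' ')
      = coldata.map (fun r => r.toList.getD i ' ') := by
  rw [List.map_map]; rfl

theorem pv_k_eq (coldata : List String) (i : Nat) :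
    (((coldata.map String.toList).map (fun r => r.getD i ' ')).filter pvIsRock).length
      = pv_k coldata i := by
  rw [pv_col_eq]; rfl

-- ===== VERDICT (by name: the statement is the Claim_ definition above) =====
theorem roll_cycle_spec : Claim_equal_roll_cycle := by
  intro coldata _ hpre
  unfold Spec_roll_cycle
  unfold Pre_roll_cycle at hpre
  simp only [Bool.and_eq_true, Bool.not_eq_true', List.isEmpty_eq_false_iff, decide_eq_true_eq,
    List.all_eq_true, List.mem_range] at hpre
  obtain ⟨⟨⟨⟨hne, hw0⟩, hge'⟩, hki⟩, hk0⟩ := hpre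
  have hge : ∀ r ∈ coldata, (coldata.headD "").toList.length ≤ r.toList.length :=
    fun r hr => hge' r hr
  have hge0 : ∀ r ∈ coldata.map String.toList, (coldata.headD "").toList.length ≤ r.length := by
    intro r hr
    rcases List.mem_map.mp hr with ⟨row, hrow, hr'⟩
    subst hr'
    exact hge row hrow
  have hhead0 : ((coldata.map String.toList).headD []).length = (coldata.headD "").toList.length := by
    rw [pv_headD_map coldata String.toList [] "" hne]
  -- the grid after the first pass (tilt north, stored transposed), possibly ragged
  set W1 := (pvTn (coldata.headD "").toList.length (coldata.map String.toList)).map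
      (fun c => pvRollSeg 0 0 (c.filter pvIsRock)) with hW1
  have hW1mem : ∀ r ∈ W1, ∃ i, i < (coldata.headD "").toList.length ∧
      r = pvRollSeg 0 0 (((coldata.map String.toList).map (fun s => s.getD i ' ')).filter pvIsRock) := by
    intro r hr
    rw [hW1] at hr
    rcases List.mem_map.mp hr with ⟨c, hc, hr'⟩
    subst hr'
    simp only [pvTn, List.mem_map, List.mem_range] at hc
    rcases hc with ⟨i, hi, hc'⟩
    subst hc'
    exact ⟨i, hi, rfl⟩
  have hW1rock : ∀ r ∈ W1, ∀ c ∈ r, pvRock c := by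
    intro r hr
    rcases hW1mem r hr with ⟨i, _, rfl⟩
    exact pv_rollSeg_rock _ 0 0
  have hW1ge : ∀ r ∈ W1, pv_k coldata 0 ≤ r.length := by
    intro r hr
    rcases hW1mem r hr with ⟨i, hi, rfl⟩
    rw [pv_rollSeg_length _ (pv_filter_rock _) 0 0]
    have := hki i hi
    rw [← pv_k_eq coldata i] at this
    omega
  have hW1len : W1.length = (coldata.headD "").toList.length := by
    rw [hW1]; simp [pvTn]
  have hW1ne : W1 ≠ [] := by
    apply List.ne_nil_of_length_pos
    rw [hW1len]; exact hw0
  have hW1head : (W1.headD []).length = pv_k coldata 0 := by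
    have h1 : W1.headD [] = pvRollSeg 0 0
        (((coldata.map String.toList).map (fun r => r.getD 0 ' ')).filter pvIsRock) := by
      rw [hW1]
      show ((pvTn _ _).map _).headD [] = _
      rw [pvTn, List.map_map]
      exact pv_range_map_headD _ _ [] hw0
    rw [h1, pv_rollSeg_length _ (pv_filter_rock _) 0 0, pv_k_eq]
    omega
  -- the grid after the second pass (tilt west), rectangular from here on
  have hG2p : pvGrid (pv_k coldata 0) (coldata.headD "").toList.length
      (pvTn (pv_k coldata 0) W1) :=
    pv_grid_Tn0 W1 _ _ hW1len hW1ge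
      (fun r hr c hc => hW1rock r hr c (List.mem_of_mem_take hc))
  have hG2 : pvGrid (pv_k coldata 0) (coldata.headD "").toList.length
      ((pvTn (pv_k coldata 0) W1).map (fun r => pvRollSeg 0 0 r)) := pv_grid_mapR _ _ _ hG2p
  have hG3p : pvGrid (coldata.headD "").toList.length (pv_k coldata 0)
      (pvTn (coldata.headD "").toList.length
        ((pvTn (pv_k coldata 0) W1).map (fun r => pvRollSeg 0 0 r))) := pv_grid_Tn _ _ _ hG2
  have hG3 : pvGrid (coldata.headD "").toList.length (pv_k coldata 0)
      ((pvTn (coldata.headD "").toList.length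
        ((pvTn (pv_k coldata 0) W1).map (fun r => pvRollSeg 0 0 r))).map
        (fun r => (pvRollSeg 0 0 r.reverse).reverse)) := pv_grid_mapRrev _ _ _ hG3p
  have hG4p : pvGrid (pv_k coldata 0) (coldata.headD "").toList.length
      (pvTn (pv_k coldata 0)
        ((pvTn (coldata.headD "").toList.length
          ((pvTn (pv_k coldata 0) W1).map (fun r => pvRollSeg 0 0 r))).map
          (fun r => (pvRollSeg 0 0 r.reverse).reverse))) := pv_grid_Tn _ _ _ hG3
  -- A side
  show roll_cycle coldata = _
  unfold roll_cycle
  dsimp only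
  rw [pv_pass1A coldata _ rfl hge, ← hW1]
  rw [pv_passA W1 (pv_k coldata 0) hW1ne hW1head hW1ge hW1rock]
  rw [pv_passA_rev _ _ _ hG2 hk0]
  rw [pv_passA_rev _ _ _ hG3 hw0]
  -- B side
  unfold roll_cycle_alt
  dsimp only
  rw [pv_transpose_eq (coldata.map String.toList) (coldata.headD "").toList.length
      (by simpa using hne) hhead0 hge0]
  rw [pv_roll_left_map (pvTn (coldata.headD "").toList.length (coldata.map String.toList)), ← hW1]
  rw [pv_transpose_eq W1 (pv_k coldata 0) hW1ne hW1head hW1ge]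
  rw [pv_roll_left_map_rock _ _ _ hG2p]
  rw [pv_transpose_grid_eq _ _ _ hG2 hk0]
  rw [pv_roll_right_map _ _ _ hG3p]
  rw [pv_transpose_grid_eq _ _ _ hG3 hw0]
  rw [pv_roll_right_map _ _ _ hG4p]
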